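-- pv_equiv track=rewrite | github.com/cristobalgvera/ejercicios-python | basics/others/generator.py | generate_even_return
-- ===== SOURCE A (Python) =====
-- def generate_even_return(upper_limit=0):
--     my_list = [0]
--     m = 1
--     while my_list[m - 1] <= upper_limit:
--         my_list.append(m * 2)
--         m += 1
--     my_list.pop()
--     if len(my_list) != 0:
--         my_list.pop(0)
--     return my_list
-- ===== SOURCE B (Python) =====
-- def generate_even_return(upper_limit=0):
--     count = max(0, upper_limit // 2)
--     return [2 * (i + 1) for i in range(count)]
-- ===== Notes on version B (the rewrite author's own statement) =====
-- stated objective: simpler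
-- what changed: Replaces A's grow-overshoot-then-trim while loop (a seed sentinel, one overshoot append, a back pop and a linear front pop) with a clamped closed-form element count and a direct index-driven comprehension.
import Mathlib
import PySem

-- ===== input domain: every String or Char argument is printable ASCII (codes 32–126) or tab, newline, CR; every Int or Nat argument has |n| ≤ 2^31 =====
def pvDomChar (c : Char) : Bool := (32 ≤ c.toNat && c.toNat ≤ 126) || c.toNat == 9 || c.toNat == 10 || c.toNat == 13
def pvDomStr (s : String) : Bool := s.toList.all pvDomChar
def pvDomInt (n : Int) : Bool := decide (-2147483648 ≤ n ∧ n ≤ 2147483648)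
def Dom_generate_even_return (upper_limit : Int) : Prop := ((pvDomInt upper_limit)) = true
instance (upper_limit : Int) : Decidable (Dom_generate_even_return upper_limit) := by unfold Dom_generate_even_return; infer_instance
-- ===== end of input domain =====

-- B replaces A's grow-overshoot-then-trim loop with a closed-form count and a direct fill (simpler).

-- ===== PORT A =====
-- A's while loop: keep appending m*2 while the last element my_list[m-1] ≤ upper_limit.
-- Fuel only makes the recursion total; it is always sufficient (proved below) and never changes the result.
def pvLoopA (upper_limit : Int) : Nat → List Int → Int → List Int
  | 0, lst, _ => lst
  | fuel + 1, lst, m =>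
    match PySem.List.pyGet? lst (m - 1) with
    | none => lst            -- unreachable: m-1 always indexes the last element
    | some last =>
      if last ≤ upper_limit then pvLoopA upper_limit fuel (lst ++ [m * 2]) (m + 1)
      else lst

def generate_even_return (upper_limit : Int) : List Int :=
  let lst := pvLoopA upper_limit (upper_limit.toNat + 2) [0] 1
  let lst := lst.dropLast                             -- my_list.pop()
  if lst.length ≠ 0 then lst.drop 1 else lst          -- my_list.pop(0)

-- ===== PORT B =====
def generate_even_return_alt (upper_limit : Int) : List Int :=
  let count := max 0 (PySem.Int.floordiv upper_limit 2)
  (List.range count.toNat).map (fun i : Nat => 2 * ((i : Int) + 1))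

-- ===== PRECONDITION & SPEC =====
def Spec_generate_even_return (upper_limit : Int) (out : List Int) : Prop := out = generate_even_return_alt upper_limit
instance (upper_limit : Int) (out : List Int) : Decidable (Spec_generate_even_return upper_limit out) := by unfold Spec_generate_even_return; infer_instance

-- ===== CLAIM (what is proved, stated in full; the proofs are below) =====
def Claim_equal_generate_even_return : Prop := ∀ (upper_limit : Int), Dom_generate_even_return upper_limit → Spec_generate_even_return upper_limit (generate_even_return upper_limit)

-- ===== LEMMAS AND PROOFS =====

-- the list A holds when its loop counter is m : [0, 2, 4, …, 2*(m-1)]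
def pvEv (m : Nat) : List Int := (List.range m).map (fun i : Nat => 2 * (i : Int))

theorem pvEv_get_last (m : Nat) (h : 1 ≤ m) :
    PySem.List.pyGet? (pvEv m) ((m : Int) - 1) = some (2 * ((m : Int) - 1)) := by
  have hl : (pvEv m).length = m := by simp [pvEv]
  have hm : ((m : Int) - 1) = ((m - 1 : Nat) : Int) := by omega
  rw [hm, PySem.List.pyGet?_natCast]
  have hlt : m - 1 < (pvEv m).length := by omega
  rw [List.getElem?_eq_getElem hlt]
  simp only [pvEv, List.getElem_map, List.getElem_range]

theorem pvEv_succ (m : Nat) : pvEv m ++ [2 * (m : Int)] = pvEv (m + 1) := by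
  simp [pvEv, List.range_succ]

theorem pvLoopA_run (up : Int) (F : Nat)
    (hF : (F : Int) = PySem.Int.floordiv up 2) :
    ∀ (fuel m : Nat), 1 ≤ m → m ≤ F + 2 → F + 2 - m ≤ fuel →
      pvLoopA up fuel (pvEv m) (m : Int) = pvEv (F + 2) := by
  intro fuel
  induction fuel with
  | zero =>
    intro m h1 h2 h3
    have hm : m = F + 2 := by omega
    subst hm; rfl
  | succ fuel ih =>
    intro m h1 h2 h3
    rw [pvLoopA, pvEv_get_last m h1]
    show (if 2 * ((m : Int) - 1) ≤ up then pvLoopA up fuel (pvEv m ++ [(m : Int) * 2]) ((m : Int) + 1)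
          else pvEv m) = pvEv (F + 2)
    have hfd : PySem.Int.floordiv up 2 = up / 2 :=
      PySem.Int.floordiv_eq_ediv_of_pos (by omega)
    by_cases hle : 2 * ((m : Int) - 1) ≤ up
    · -- condition holds, so m ≤ F + 1
      have hmF : m ≤ F + 1 := by
        have : (m : Int) - 1 ≤ up / 2 := by omega
        omega
      simp only [if_pos hle]
      have : pvEv m ++ [(m : Int) * 2] = pvEv (m + 1) := by
        rw [← pvEv_succ]; ring_nf
      rw [this]
      have := ih (m + 1) (by omega) (by omega) (by omega)
      simpa [Nat.cast_add] using this
    · -- condition fails: m = F + 2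
      have hmF : F + 2 ≤ m := by
        have : ¬ ((m : Int) - 1 ≤ up / 2) := by
          intro h
          exact hle (by omega)
        omega
      have hm : m = F + 2 := by omega
      rw [if_neg hle, hm]

theorem generate_even_return_eq_alt (up : Int) : generate_even_return up = generate_even_return_alt up := by
  by_cases hup : 0 ≤ up
  · -- nonnegative case
    set F : Nat := (PySem.Int.floordiv up 2).toNat with hFdef
    have hfd : PySem.Int.floordiv up 2 = up / 2 :=
      PySem.Int.floordiv_eq_ediv_of_pos (by omega)
    have hF : (F : Int) = PySem.Int.floordiv up 2 := by
      rw [hFdef, Int.toNat_of_nonneg]; rw [hfd]; omega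
    have hfuel : F + 2 - 1 ≤ up.toNat + 2 := by
      have : (F : Int) ≤ up := by rw [hF, hfd]; omega
      omega
    have hrun := pvLoopA_run up F hF (up.toNat + 2) 1 (by omega) (by omega) hfuel
    have h1 : pvEv 1 = [0] := by simp [pvEv]
    rw [h1] at hrun
    have hrun' : pvLoopA up (up.toNat + 2) [0] 1 = pvEv (F + 2) := by
      simpa using hrun
    simp only [generate_even_return, hrun']
    have hdrop : (pvEv (F + 2)).dropLast = pvEv (F + 1) := by
      rw [← pvEv_succ (F + 1)]
      simp
    rw [hdrop]
    have hlen : (pvEv (F + 1)).length = F + 1 := by simp [pvEv]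
    rw [if_pos (by rw [hlen]; omega)]
    -- (pvEv (F+1)).drop 1 = B's list
    have hmax : max (0 : Int) (PySem.Int.floordiv up 2) = (F : Int) := by
      rw [hF]; rw [hfd]; omega
    show (pvEv (F + 1)).drop 1 = _
    rw [generate_even_return_alt]
    simp only [hmax, Int.toNat_natCast]
    rw [pvEv, List.range_succ_eq_map, List.map_cons, List.drop_succ_cons, List.drop_zero,
      List.map_map]
    apply List.map_congr_left
    intro i _
    simp [Function.comp]
  · -- negative case: loop body never executes
    have hneg : ¬ ((0 : Int) ≤ up) := hup
    have h0 : pvLoopA up (up.toNat + 2) [0] 1 = [0] := by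
      have ht : up.toNat = 0 := by omega
      rw [ht]
      rw [pvLoopA]
      rw [show PySem.List.pyGet? ([0] : List Int) ((1 : Int) - 1) = some 0 from by decide]
      show (if (0 : Int) ≤ up then pvLoopA up 1 ([0] ++ [1 * 2]) (1 + 1) else [0]) = [0]
      rw [if_neg (by omega)]
    simp only [generate_even_return, h0]
    have hmax : max (0 : Int) (PySem.Int.floordiv up 2) = 0 := by
      have hfd : PySem.Int.floordiv up 2 ≤ 0 := by
        have h2 : PySem.Int.floordiv up 2 = up / 2 :=
          PySem.Int.floordiv_eq_ediv_of_pos (by omega)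
        rw [h2]; omega
      omega
    simp only [generate_even_return_alt, hmax]
    simp

-- ===== VERDICT (by name: the statement is the Claim_ definition above) =====
theorem generate_even_return_spec : Claim_equal_generate_even_return := by
  intro up _
  exact generate_even_return_eq_alt up
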